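-- pv_equiv track=rewrite | github.com/apache/incubator-teaclave-sgx-sdk | third_party/fancy-garbling/scripts/make_lookup_tables.py | digits_for_pos
-- ===== SOURCE A (Python) =====
-- bits_per_chunk = 8
--
-- def digits(x, base):
--     ds = []
--     while x >= base:
--         d = x % base
--         ds.append(d)
--         x = (x - d) // base
--     ds.append(x)
--     return ds
--
-- def digits_for_pos(pos, base):
--     max_ndigits = 0;
--     ds = []
--     for x in range(1<<bits_per_chunk):
--         d = digits(x << (bits_per_chunk * pos), base)
--         ds.append(d)
--         max_ndigits = max(len(d), max_ndigits)
--
--     # pad them to be the same length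
--     for d in ds:
--         while (len(d) < max_ndigits):
--             d.append(0)
--
--     return (max_ndigits, ds)
-- ===== SOURCE B (Python) =====
-- bits_per_chunk = 8
--
-- def digits(x, base):
--     ds = []
--     while x >= base:
--         d = x % base
--         ds.append(d)
--         x = (x - d) // base
--     ds.append(x)
--     return ds
--
-- def digits_for_pos(pos, base):
--     shift = bits_per_chunk * pos
--     # the largest byte value has the longest digit decomposition
--     max_ndigits = len(digits(255 << shift, base))
--     ds = []
--     for x in range(1 << bits_per_chunk):
--         d = digits(x << shift, base)
--         d.extend([0] * (max_ndigits - len(d)))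
--         ds.append(d)
--     return (max_ndigits, ds)
-- ===== Notes on version B (the rewrite author's own statement) =====
-- stated objective: simpler
-- what changed: B computes max_ndigits in closed form as the digit count of the largest value 255<<shift (digit length is monotone), then builds each row already padded in a single pass, dropping A's running-max accumulator and its separate trailing padding loop.
import Mathlib
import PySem

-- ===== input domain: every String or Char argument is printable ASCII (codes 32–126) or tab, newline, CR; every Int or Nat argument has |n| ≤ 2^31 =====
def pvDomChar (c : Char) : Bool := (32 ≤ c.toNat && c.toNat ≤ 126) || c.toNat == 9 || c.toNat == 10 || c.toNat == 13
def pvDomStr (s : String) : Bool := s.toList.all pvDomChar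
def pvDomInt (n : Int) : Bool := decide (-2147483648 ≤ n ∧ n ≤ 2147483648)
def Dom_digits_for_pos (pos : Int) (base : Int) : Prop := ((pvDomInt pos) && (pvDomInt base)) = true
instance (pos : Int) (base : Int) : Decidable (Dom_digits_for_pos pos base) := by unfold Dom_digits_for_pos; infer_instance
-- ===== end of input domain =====

-- B drops A's running-max accumulator and the separate trailing padding pass: it computes
-- max_ndigits in closed form from the largest value 255<<shift and pads each row in one pass.
-- Return-value equivalence only; neither version mutates its arguments.

-- ===== PORT A =====
-- shared helper: Python's `digits` while-loop, ported with fuel (the loop body divides x by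
-- base, so for base ≥ 2, 0 ≤ x it runs at most x.toNat times; fuel only makes it total).
def digitsGo (fuel : Nat) (x : Int) (base : Int) : List Int :=
  match fuel with
  | 0 => [x]
  | f + 1 =>
    if base ≤ x then
      PySem.Int.mod x base
        :: digitsGo f (PySem.Int.floordiv (x - PySem.Int.mod x base) base) base
    else [x]

def pydigits (x : Int) (base : Int) : List Int := digitsGo (x.toNat + 1) x base

-- while (len(d) < max_ndigits): d.append(0)  — ported with fuel (max_ndigits.toNat suffices)
def padGo (fuel : Nat) (d : List Int) (m : Int) : List Int :=
  match fuel with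
  | 0 => d
  | f + 1 => if (d.length : Int) < m then padGo f (d ++ [0]) m else d

def digits_for_pos (pos : Int) (base : Int) : Int × List (List Int) :=
  -- for x in range(1<<8): d = digits(x << (8*pos), base); ds.append(d); max_ndigits = max(len d, max_ndigits)
  let st := (PySem.List.pyRange 0 256 1).foldl
    (fun (st : Int × List (List Int)) x =>
      let d := pydigits (x * 2 ^ (8 * pos).toNat) base   -- x << (8*pos), exact for pos ≥ 0
      (max (d.length : Int) st.1, st.2 ++ [d]))
    (0, [])
  (st.1, st.2.map (fun d => padGo st.1.toNat d st.1))

-- ===== PORT B =====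
def digits_for_pos_alt (pos : Int) (base : Int) : Int × List (List Int) :=
  let shift := 8 * pos
  let max_ndigits : Int := (pydigits (255 * 2 ^ shift.toNat) base).length
  let ds := (PySem.List.pyRange 0 256 1).map (fun x =>
    let d := pydigits (x * 2 ^ shift.toNat) base
    d ++ List.replicate (max_ndigits - (d.length : Int)).toNat 0)   -- d.extend([0]*(max-len d))
  (max_ndigits, ds)

-- ===== PRECONDITION & SPEC =====
-- Pre_ excludes exactly the inputs where Python A does not return: pos < 0 (negative shift
-- raises ValueError), base = 0 (ZeroDivisionError), and base = 1 or base < 0 (the while loop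
-- in digits never terminates).
def Pre_digits_for_pos (pos : Int) (base : Int) : Prop := 0 ≤ pos ∧ 2 ≤ base
instance (pos : Int) (base : Int) : Decidable (Pre_digits_for_pos pos base) := by
  unfold Pre_digits_for_pos; infer_instance
def pvWitness_digits_for_pos : Int × Int := (1, 3)

def Spec_digits_for_pos (pos : Int) (base : Int) (out : Int × List (List Int)) : Prop :=
  out = digits_for_pos_alt pos base
instance (pos : Int) (base : Int) (out : Int × List (List Int)) :
    Decidable (Spec_digits_for_pos pos base out) := by unfold Spec_digits_for_pos; infer_instance

-- ===== CLAIM (what is proved, stated in full; the proofs are below) =====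
def Claim_equal_digits_for_pos : Prop := ∀ (pos : Int) (base : Int), Dom_digits_for_pos pos base → Pre_digits_for_pos pos base → Spec_digits_for_pos pos base (digits_for_pos pos base)

-- ===== LEMMAS AND PROOFS =====

theorem ediv_lt_aux (a b : Int) (h0 : 0 < a) (h1 : 2 ≤ b) : a / b < a := by
  have h2 := Int.emod_nonneg a (by omega : b ≠ 0)
  have h3 := Int.mul_ediv_add_emod a b
  have hq : 0 ≤ a / b := Int.ediv_nonneg (le_of_lt h0) (by omega)
  by_contra h
  push_neg at h
  nlinarith

-- reference (fuel-free) form of `digits` on the admitted domain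
def digSpec (x : Int) (base : Int) : List Int :=
  if h : 2 ≤ base ∧ base ≤ x then (x % base) :: digSpec (x / base) base else [x]
  termination_by x.toNat
  decreasing_by
    have h1 := ediv_lt_aux x base (by omega) h.1
    have h2 : 0 ≤ x / base := Int.ediv_nonneg (by omega) (by omega)
    omega

theorem digSpec_eq (x base : Int) : digSpec x base =
    if _ : 2 ≤ base ∧ base ≤ x then (x % base) :: digSpec (x / base) base else [x] := by
  rw [digSpec]

theorem digSpec_length_pos (x base : Int) : 1 ≤ (digSpec x base).length := by
  rw [digSpec_eq]; split <;> simp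

theorem digitsGo_succ (f : Nat) (x base : Int) : digitsGo (f + 1) x base =
    (if base ≤ x then
      PySem.Int.mod x base
        :: digitsGo f (PySem.Int.floordiv (x - PySem.Int.mod x base) base) base
    else [x]) := rfl

theorem digitsGo_eq_digSpec (base : Int) (hb : 2 ≤ base) :
    ∀ (f : Nat) (x : Int), 0 ≤ x → x.toNat ≤ f → digitsGo (f + 1) x base = digSpec x base := by
  intro f
  induction f with
  | zero =>
    intro x hx hf
    have hx0 : x = 0 := by omega
    subst hx0
    rw [digitsGo_succ, if_neg (by omega), digSpec_eq, dif_neg (by omega)]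
  | succ f ih =>
    intro x hx hf
    rw [digitsGo_succ]
    by_cases hc : base ≤ x
    · have hmod : PySem.Int.mod x base = x % base :=
        PySem.Int.mod_eq_emod_of_pos (show (0:Int) < base by omega)
      have hdiv : PySem.Int.floordiv (x - x % base) base = x / base := by
        rw [PySem.Int.floordiv_eq_ediv_of_pos (show (0:Int) < base by omega)]
        have h4 : x - x % base = base * (x / base) := by
          have h5 := Int.mul_ediv_add_emod x base
          linarith
        rw [h4, Int.mul_ediv_cancel_left _ (by omega : base ≠ 0)]
      have hx' : 0 ≤ x / base := Int.ediv_nonneg (by omega) (by omega)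
      have hlt : x / base < x := ediv_lt_aux x base (by omega) hb
      have hf' : (x / base).toNat ≤ f := by omega
      rw [if_pos hc, hmod, hdiv, ih _ hx' hf', digSpec_eq (x := x), dif_pos ⟨hb, hc⟩]
    · rw [if_neg hc, digSpec_eq, dif_neg (by tauto)]

theorem pydigits_eq_digSpec (x base : Int) (hb : 2 ≤ base) (hx : 0 ≤ x) :
    pydigits x base = digSpec x base :=
  digitsGo_eq_digSpec base hb x.toNat x hx (le_refl _)

-- digit-length is monotone in the value (for base ≥ 2, on nonnegative values)
theorem digSpec_length_mono (base : Int) (hb : 2 ≤ base) :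
    ∀ (n : Nat) (x y : Int), 0 ≤ x → x ≤ y → y.toNat ≤ n →
      (digSpec x base).length ≤ (digSpec y base).length := by
  intro n
  induction n with
  | zero =>
    intro x y hx hxy hn
    have hx0 : x = 0 := by omega
    have hy0 : y = 0 := by omega
    subst hx0; subst hy0; exact le_refl _
  | succ n ih =>
    intro x y hx hxy hn
    by_cases hy : base ≤ y
    · rw [digSpec_eq (x := y), dif_pos ⟨hb, hy⟩]
      by_cases hxb : base ≤ x
      · rw [digSpec_eq (x := x), dif_pos ⟨hb, hxb⟩]
        simp only [List.length_cons, Nat.add_le_add_iff_right]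
        have hd : x / base ≤ y / base := Int.ediv_le_ediv (by omega) hxy
        have hx' : 0 ≤ x / base := Int.ediv_nonneg (by omega) (by omega)
        have hlt : y / base < y := ediv_lt_aux y base (by omega) hb
        have hy' : 0 ≤ y / base := Int.ediv_nonneg (by omega) (by omega)
        exact ih _ _ hx' hd (by omega)
      · rw [digSpec_eq (x := x), dif_neg (by tauto)]
        have h1 := digSpec_length_pos (y / base) base
        simp only [List.length_cons, List.length_nil]
        omega
    · have hxb : ¬ base ≤ x := by omega
      rw [digSpec_eq (x := x), dif_neg (by tauto), digSpec_eq (x := y), dif_neg (by tauto)]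
      exact le_refl _

-- extract A's fold: the max accumulator and the accumulated list, separately
theorem foldA_split (pos base : Int) :
    ∀ (l : List Int) (m : Int) (acc : List (List Int)),
      (l.foldl (fun (st : Int × List (List Int)) x =>
          let d := pydigits (x * 2 ^ (8 * pos).toNat) base
          (max (d.length : Int) st.1, st.2 ++ [d])) (m, acc))
      = (l.foldl (fun m x => max ((pydigits (x * 2 ^ (8 * pos).toNat) base).length : Int) m) m,
         acc ++ l.map (fun x => pydigits (x * 2 ^ (8 * pos).toNat) base)) := by
  intro l
  induction l with
  | nil => simp
  | cons h t ih => intro m acc; simp [List.foldl_cons, ih]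

theorem foldl_max_le {g : Int → Int} {M : Int} :
    ∀ (l : List Int) (m : Int), (∀ x ∈ l, g x ≤ M) → m ≤ M →
      l.foldl (fun m x => max (g x) m) m ≤ M := by
  intro l
  induction l with
  | nil => intro m _ hm; simpa using hm
  | cons h t ih =>
    intro m hall hm
    simp only [List.foldl_cons]
    exact ih _ (fun x hx => hall x (List.mem_cons_of_mem _ hx))
      (max_le (hall h (List.mem_cons_self)) hm)

theorem init_le_foldl_max {g : Int → Int} :
    ∀ (l : List Int) (a b : Int), a ≤ b → a ≤ l.foldl (fun m x => max (g x) m) b := by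
  intro l
  induction l with
  | nil => intro a b h; simpa using h
  | cons h t ih =>
    intro a b hab
    simp only [List.foldl_cons]
    exact ih _ _ (le_trans hab (le_max_right _ _))

theorem le_foldl_max {g : Int → Int} :
    ∀ (l : List Int) (m : Int) (x : Int), x ∈ l →
      g x ≤ l.foldl (fun m x => max (g x) m) m := by
  intro l
  induction l with
  | nil => intro m x hx; simp at hx
  | cons h t ih =>
    intro m x hx
    simp only [List.foldl_cons]
    rcases List.mem_cons.mp hx with rfl | hx
    · exact init_le_foldl_max t _ _ (le_max_left _ _)
    · exact ih _ _ hx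

-- the padGo while-loop is appending zeros up to m
theorem padGo_eq (m : Int) :
    ∀ (f : Nat) (d : List Int), m ≤ (d.length : Int) + f →
      padGo f d m = d ++ List.replicate (m.toNat - d.length) 0 := by
  intro f
  induction f with
  | zero =>
    intro d hd
    have h0 : m.toNat - d.length = 0 := by omega
    simp [padGo, h0]
  | succ f ih =>
    intro f2 hd
    simp only [padGo]
    by_cases hc : (f2.length : Int) < m
    · rw [if_pos hc, ih (f2 ++ [0]) (by simp; omega)]
      have h1 : m.toNat - f2.length = (m.toNat - (f2.length + 1)) + 1 := by omega
      simp only [List.length_append, List.length_singleton, List.append_assoc,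
        List.singleton_append, h1, List.replicate_succ]
    · rw [if_neg hc]
      have h0 : m.toNat - f2.length = 0 := by omega
      simp [h0]

-- ===== VERDICT (by name: the statement is the Claim_ definition above) =====
theorem digits_for_pos_spec : Claim_equal_digits_for_pos := by
  intro pos base _ hpre
  obtain ⟨hpos, hb⟩ := hpre
  unfold Spec_digits_for_pos digits_for_pos digits_for_pos_alt
  set s : Nat := (8 * pos).toNat with hs
  set g : Int → Int := fun x => ((pydigits (x * 2 ^ s) base).length : Int) with hg
  set M : Int := ((pydigits ((255:Int) * 2 ^ s) base).length : Int) with hM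
  have hpow : (0:Int) < 2 ^ s := by positivity
  have hmono : ∀ x : Int, 0 ≤ x → x ≤ 255 → g x ≤ M := by
    intro x hx0 hx1
    have e1 : pydigits (x * 2 ^ s) base = digSpec (x * 2 ^ s) base :=
      pydigits_eq_digSpec _ _ hb (by positivity)
    have e2 : pydigits ((255:Int) * 2 ^ s) base = digSpec ((255:Int) * 2 ^ s) base :=
      pydigits_eq_digSpec _ _ hb (by positivity)
    have hle : x * 2 ^ s ≤ (255:Int) * 2 ^ s :=
      mul_le_mul_of_nonneg_right hx1 hpow.le
    simp only [hg, hM, e1, e2]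
    exact Int.ofNat_le.mpr
      (digSpec_length_mono base hb ((255:Int) * 2 ^ s).toNat _ _ (by positivity)
        hle (le_refl _))
  have hMpos : 1 ≤ M := by
    have e2 : pydigits ((255:Int) * 2 ^ s) base = digSpec ((255:Int) * 2 ^ s) base :=
      pydigits_eq_digSpec _ _ hb (by positivity)
    simp only [hM, e2]
    exact_mod_cast Int.ofNat_le.mpr (digSpec_length_pos _ _)
  rw [foldA_split]
  have hmax : (PySem.List.pyRange 0 256 1).foldl (fun m x => max (g x) m) 0 = M := by
    apply le_antisymm
    · exact foldl_max_le _ _ (fun x hx => by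
        rcases (PySem.List.mem_pyRange_one).mp hx with ⟨h1, h2⟩
        exact hmono x h1 (by omega)) (by omega)
    · have h255 : (255 : Int) ∈ PySem.List.pyRange 0 256 1 :=
        (PySem.List.mem_pyRange_one).mpr ⟨by norm_num, by norm_num⟩
      exact le_foldl_max (g := g) (PySem.List.pyRange 0 256 1) 0 255 h255
  simp only [List.nil_append]
  rw [show (fun m x => max ((pydigits (x * 2 ^ s) base).length : Int) m)
        = (fun m x => max (g x) m) from rfl, hmax]
  refine Prod.ext rfl ?_
  dsimp only
  rw [List.map_map]
  apply List.map_congr_left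
  intro x hx
  simp only [Function.comp]
  rw [padGo_eq M M.toNat _ (by omega)]
  have hcnt : M.toNat - (pydigits (x * 2 ^ s) base).length
      = (M - ((pydigits (x * 2 ^ s) base).length : Int)).toNat := by omega
  rw [hcnt]
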